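-- pv_equiv track=rewrite | github.com/Slirb/PythonPlayground | wordfunctions.py | stretchWord
-- ===== SOURCE A (Python) =====
-- import math
--
-- def stretchWord(word):
--     middleBuild = ""
--     firstBuild = ""
--     secondBuild = ""
--
--     if word == "" or  word == " ":
--         return word
--     length = len(word)
--
--     # Only stretch words of 3 characters or more
--     if length < 3:
--         return word
--
--     # If odd we need to build the middle segment
--     if length % 2 != 0:
--         length = int(length / 2)
--         middleBuild = (length + 1) * word[length]
--     else:
--         length = math.trunc(length/2)
--
--     firstHalf = word[ :length]
--     secondHalf = word[-length:]
--
--     # Build the halfs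
--     for x in range(length):
--         # First half
--         firstBuild += firstHalf[x] * (x + 1)
--
--         # Second half
--         secondBuild += secondHalf[x] * (length - x)
--
--
--     stretchedWord = firstBuild + middleBuild + secondBuild
--     return stretchedWord
-- ===== SOURCE B (Python) =====
-- def stretchWord(word):
--     if word == "" or word == " ":
--         return word
--     n = len(word)
--     if n < 3:
--         return word
--     return "".join(c * min(i + 1, n - i) for i, c in enumerate(word))
-- ===== Notes on version B (the rewrite author's own statement) =====
-- stated objective: simpler
-- what changed: B replaces the odd/even split with separate firstHalf/middle/secondHalf accumulations by a single pass that repeats each character min(i+1, n-i) times (its distance to the nearer edge) and joins the pieces.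
import Mathlib
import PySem

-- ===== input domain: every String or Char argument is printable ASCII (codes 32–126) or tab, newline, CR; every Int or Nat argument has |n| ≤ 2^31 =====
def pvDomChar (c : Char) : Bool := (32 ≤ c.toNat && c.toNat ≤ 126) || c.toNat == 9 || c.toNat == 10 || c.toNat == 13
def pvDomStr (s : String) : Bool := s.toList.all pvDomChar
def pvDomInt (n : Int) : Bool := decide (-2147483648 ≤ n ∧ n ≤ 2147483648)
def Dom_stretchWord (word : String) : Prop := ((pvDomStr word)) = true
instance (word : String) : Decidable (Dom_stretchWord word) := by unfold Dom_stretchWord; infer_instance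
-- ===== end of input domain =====

-- B replaces A's odd/even split with half/middle/half accumulations by one pass repeating
-- each character min(i+1, n-i) times; objective: simpler.

-- ===== PORT A =====
-- Core on the character list (string facts are proved on the list side, per PySem convention).
-- Python's `int(length / 2)` and `math.trunc(length / 2)` both equal Nat division by 2 for the
-- nonnegative `len(word)`, so the reassigned `length` is hoisted as `half := cs.length / 2`,
-- the same value both branches of A compute.  Indices fed to pyGetD are always in range and the
-- replicate counts are nonnegative, so the defaults / `.toNat` clamps are never exercised.
def stretchACore (cs : List Char) : List Char :=
  if cs = [] ∨ cs = [' '] then cs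
  else if cs.length < 3 then cs
  else
    let half : Nat := cs.length / 2
    let middleBuild : List Char :=
      if cs.length % 2 ≠ 0 then
        List.replicate (half + 1) (PySem.List.pyGetD cs (half : Int) ' ')
      else []
    let firstHalf := PySem.List.slice cs none (some (half : Int))
    let secondHalf := PySem.List.slice cs (some (-(half : Int))) none
    let p := (PySem.List.pyRange 0 (half : Int) 1).foldl
      (fun (p : List Char × List Char) x =>
        (p.1 ++ List.replicate (x + 1).toNat (PySem.List.pyGetD firstHalf x ' '),
         p.2 ++ List.replicate ((half : Int) - x).toNat (PySem.List.pyGetD secondHalf x ' ')))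
      ([], [])
    p.1 ++ middleBuild ++ p.2

def stretchWord (word : String) : String := String.ofList (stretchACore word.toList)

-- ===== PORT B =====
-- One pass: character at index i is repeated min(i+1, n-i) times; join the pieces.
def stretchBCore (cs : List Char) : List Char :=
  if cs = [] ∨ cs = [' '] then cs
  else if cs.length < 3 then cs
  else
    ((PySem.List.enumerate cs 0).map
      (fun ic => List.replicate (min (ic.1 + 1) ((cs.length : Int) - ic.1)).toNat ic.2)).flatten

def stretchWord_alt (word : String) : String := String.ofList (stretchBCore word.toList)

-- ===== PRECONDITION & SPEC =====
def Spec_stretchWord (word : String) (out : String) : Prop := out = stretchWord_alt word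
instance (word : String) (out : String) : Decidable (Spec_stretchWord word out) := by unfold Spec_stretchWord; infer_instance

-- ===== CLAIM (what is proved, stated in full; the proofs are below) =====
def Claim_equal_stretchWord : Prop := ∀ (word : String), Dom_stretchWord word → Spec_stretchWord word (stretchWord word)

-- ===== LEMMAS AND PROOFS =====

-- A's build loop: a fold appending to both components is the pair of flatMaps.
theorem foldl_pair_append (g1 g2 : Nat → List Char) (k : Nat) (fb sb : List Char) :
    (List.range k).foldl (fun (p : List Char × List Char) i => (p.1 ++ g1 i, p.2 ++ g2 i)) (fb, sb)
      = (fb ++ (List.range k).flatMap g1, sb ++ (List.range k).flatMap g2) := by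
  induction k generalizing fb sb with
  | zero => simp
  | succ k ih =>
    rw [List.range_succ, List.foldl_append, ih]
    simp

-- congruence for flatMap over an index range (bodies agreeing below the bound)
theorem flatMap_range_congr (m : Nat) (f g : Nat → List Char)
    (h : ∀ i, i < m → f i = g i) : (List.range m).flatMap f = (List.range m).flatMap g := by
  rw [List.flatMap_def, List.flatMap_def]
  exact congrArg _ (List.map_congr_left (fun a ha => h a (List.mem_range.mp ha)))

theorem getD_take (cs : List Char) (k i : Nat) (h : i < k) (d : Char) :
    (cs.take k).getD i d = cs.getD i d := by
  simp [List.getD, h]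

theorem getD_drop (cs : List Char) (m j : Nat) (d : Char) :
    (cs.drop m).getD j d = cs.getD (m + j) d := by
  simp [List.getD, List.getElem?_drop]

theorem core_eq (cs : List Char) : stretchACore cs = stretchBCore cs := by
  unfold stretchACore stretchBCore
  split
  · rfl
  split
  · rfl
  rename_i hg hlen
  dsimp only
  have h3 : 3 ≤ cs.length := by omega
  set n := cs.length with hn
  set k : Nat := n / 2 with hk
  have hk1 : 0 < k := by omega
  rw [PySem.List.slice_to_natCast, PySem.List.slice_from_neg_natCast cs k hk1]
  rw [PySem.List.pyRange_zero_natCast, List.foldl_map]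
  have hloop := foldl_pair_append
    (fun i => List.replicate ((i : Int) + 1).toNat (PySem.List.pyGetD (cs.take k) (i : Int) ' '))
    (fun i => List.replicate ((k : Int) - (i : Int)).toNat (PySem.List.pyGetD (cs.drop (n - k)) (i : Int) ' '))
    k [] []
  rw [hloop]
  simp only [List.nil_append]
  -- normalise A's two half pieces to plain Nat indexing into cs
  have hA1 : (List.range k).flatMap
      (fun (i : Nat) => List.replicate ((i : Int) + 1).toNat (PySem.List.pyGetD (cs.take k) (i : Int) ' '))
      = (List.range k).flatMap (fun i => List.replicate (i + 1) (cs.getD i ' ')) := by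
    apply flatMap_range_congr
    intro i hi
    rw [PySem.List.pyGetD_natCast, getD_take cs k i hi]
    congr 1
  have hA2 : (List.range k).flatMap
      (fun (i : Nat) => List.replicate ((k : Int) - (i : Int)).toNat (PySem.List.pyGetD (cs.drop (n - k)) (i : Int) ' '))
      = (List.range k).flatMap (fun j => List.replicate (k - j) (cs.getD (n - k + j) ' ')) := by
    apply flatMap_range_congr
    intro j hj
    rw [PySem.List.pyGetD_natCast, getD_drop]
    congr 1
    omega
  rw [hA1, hA2]
  -- normalise B to a flatMap over range n with plain Nat indexing
  rw [PySem.List.enumerate_eq_map_pyRange cs ' ', PySem.List.len,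
    PySem.List.pyRange_zero_natCast, List.map_map, ← List.flatMap_def, List.flatMap_map]
  have hB : (List.range n).flatMap
      (fun (i : Nat) => ((fun (ic : Int × Char) => List.replicate (min (ic.1 + 1) ((n : Int) - ic.1)).toNat ic.2) ∘
          fun j => (j, PySem.List.pyGetD cs j ' ')) (i : Int))
      = (List.range n).flatMap (fun i => List.replicate (min (i + 1) (n - i)) (cs.getD i ' ')) := by
    apply flatMap_range_congr
    intro i hi
    simp only [Function.comp]
    rw [PySem.List.pyGetD_natCast]
    congr 1
    omega
  rw [hB]
  rcases Nat.even_or_odd n with he | ho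
  · -- even: n = 2k, no middle piece
    have hpar : n % 2 = 0 := Nat.even_iff.mp he
    have hnk : n = k + k := by omega
    have hsplit : List.range n = List.range k ++ (List.range k).map (fun j => k + j) := by
      rw [hnk]; exact List.range_add
    rw [hsplit, List.flatMap_append, List.flatMap_map]
    have hmid : ¬ (n % 2 ≠ 0) := by omega
    rw [if_neg hmid, List.append_nil]
    congr 1
    · apply flatMap_range_congr
      intro i hi
      have : min (i + 1) (n - i) = i + 1 := by omega
      rw [this]
    · apply flatMap_range_congr
      intro j hj
      have h1 : min (k + j + 1) (n - (k + j)) = k - j := by omega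
      have h2 : n - k + j = k + j := by omega
      rw [h1, h2]
  · -- odd: n = 2k+1, B's piece at index k is A's middle segment
    have hpar : n % 2 = 1 := Nat.odd_iff.mp ho
    have hnk : n = k + (1 + k) := by omega
    have hsplit : List.range n = List.range k ++ (List.range (1 + k)).map (fun j => k + j) := by
      rw [hnk]; exact List.range_add
    have hsplit2 : List.range (1 + k) = List.range 1 ++ (List.range k).map (fun j => 1 + j) :=
      List.range_add
    rw [hsplit, hsplit2, List.map_append, List.map_map, List.flatMap_append, List.flatMap_append,
      List.flatMap_map, List.flatMap_map]
    simp only [Function.comp]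
    have hmid : n % 2 ≠ 0 := by omega
    rw [if_pos hmid, List.append_assoc]
    congr 1
    · apply flatMap_range_congr
      intro i hi
      have : min (i + 1) (n - i) = i + 1 := by omega
      rw [this]
    congr 1
    · -- the middle: index k repeated k+1 times
      simp only [List.range_one, List.flatMap_cons, List.flatMap_nil, List.append_nil]
      rw [PySem.List.pyGetD_natCast]
      have : min (k + 0 + 1) (n - (k + 0)) = k + 1 := by omega
      rw [this]
      simp
    · apply flatMap_range_congr
      intro j hj
      have h1 : min (k + (1 + j) + 1) (n - (k + (1 + j))) = k - j := by omega
      have h2 : n - k + j = k + (1 + j) := by omega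
      rw [h1, h2]

-- ===== VERDICT (by name: the statement is the Claim_ definition above) =====
theorem stretchWord_spec : Claim_equal_stretchWord := by
  intro word _
  unfold Spec_stretchWord stretchWord stretchWord_alt
  rw [core_eq]
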